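-- pv_equiv track=rewrite | github.com/matey97/Programaci-nI | Boletín6/Ejercicio4.py | corregir_test
-- ===== SOURCE A (Python) =====
-- def corregir_test(plantilla, respuestas):
--     if len(plantilla)!=len(respuestas):
--         return None
--     correcto=0
--     error=0
--     ns_nc=0
--     for i in range(len(plantilla)):
--         if respuestas[i]=='*':
--             ns_nc+=1
--         elif plantilla[i]==respuestas[i]:
--             correcto+=1
--         else:
--             error+=1
--     return [correcto,error,ns_nc]
-- ===== SOURCE B (Python) =====
-- def corregir_test(plantilla, respuestas):
--     if len(plantilla) != len(respuestas):
--         return None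
--     ns_nc = respuestas.count('*')
--     correcto = sum(1 for p, r in zip(plantilla, respuestas) if r != '*' and p == r)
--     error = len(plantilla) - correcto - ns_nc
--     return [correcto, error, ns_nc]
-- ===== Notes on version B (the rewrite author's own statement) =====
-- stated objective: simpler
-- what changed: Replaces the single three-way branching counting loop by separate category passes: count '*' directly in respuestas, count matches over zip, and derive error arithmetically as len - correcto - ns_nc.
import Mathlib
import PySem

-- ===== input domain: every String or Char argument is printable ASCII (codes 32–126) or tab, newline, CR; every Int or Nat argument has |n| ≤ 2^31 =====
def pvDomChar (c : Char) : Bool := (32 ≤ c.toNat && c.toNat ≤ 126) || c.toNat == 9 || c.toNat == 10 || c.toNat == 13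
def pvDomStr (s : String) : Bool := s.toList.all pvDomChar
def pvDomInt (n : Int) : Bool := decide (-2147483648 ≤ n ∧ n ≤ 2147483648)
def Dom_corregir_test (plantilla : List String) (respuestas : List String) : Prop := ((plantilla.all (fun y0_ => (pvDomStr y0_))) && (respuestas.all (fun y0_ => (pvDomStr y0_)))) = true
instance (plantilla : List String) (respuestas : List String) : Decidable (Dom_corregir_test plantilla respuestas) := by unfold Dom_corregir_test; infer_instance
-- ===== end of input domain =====

-- B replaces A's single three-way branching loop by separate category passes
-- (count '*', count matches over zip) and derives error by subtraction (objective: simpler).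

-- ===== PORT A =====
def corregir_test (plantilla : List String) (respuestas : List String) : Option (List Int) :=
  if plantilla.length ≠ respuestas.length then none
  else
    let st := (PySem.List.pyRange 0 (plantilla.length : Int) 1).foldl
      (fun (acc : Int × Int × Int) i =>
        if PySem.List.pyGetD respuestas i "" == "*" then (acc.1, acc.2.1, acc.2.2 + 1)
        else if PySem.List.pyGetD plantilla i "" == PySem.List.pyGetD respuestas i "" then
          (acc.1 + 1, acc.2.1, acc.2.2)
        else (acc.1, acc.2.1 + 1, acc.2.2))
      (0, 0, 0)
    some [st.1, st.2.1, st.2.2]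

-- ===== PORT B =====
def corregir_test_alt (plantilla : List String) (respuestas : List String) : Option (List Int) :=
  if plantilla.length ≠ respuestas.length then none
  else
    let ns_nc : Int := (respuestas.count "*" : Int)
    let correcto : Int :=
      ((plantilla.zip respuestas).countP (fun pr => !(pr.2 == "*") && pr.1 == pr.2) : Int)
    let error : Int := (plantilla.length : Int) - correcto - ns_nc
    some [correcto, error, ns_nc]

-- ===== PRECONDITION & SPEC =====
def Spec_corregir_test (plantilla : List String) (respuestas : List String) (out : Option (List Int)) : Prop := out = corregir_test_alt plantilla respuestas
instance (plantilla : List String) (respuestas : List String) (out : Option (List Int)) : Decidable (Spec_corregir_test plantilla respuestas out) := by unfold Spec_corregir_test; infer_instance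

-- ===== CLAIM (what is proved, stated in full; the proofs are below) =====
def Claim_equal_corregir_test : Prop := ∀ (plantilla : List String) (respuestas : List String), Dom_corregir_test plantilla respuestas → Spec_corregir_test plantilla respuestas (corregir_test plantilla respuestas)

-- ===== LEMMAS AND PROOFS =====

-- the three-way step over a zipped pair, as B's proof sees A's loop body
def pvStep (acc : Int × Int × Int) (pr : String × String) : Int × Int × Int :=
  if pr.2 == "*" then (acc.1, acc.2.1, acc.2.2 + 1)
  else if pr.1 == pr.2 then (acc.1 + 1, acc.2.1, acc.2.2)
  else (acc.1, acc.2.1 + 1, acc.2.2)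

-- A's indexed loop over range(len) equals a fold over the zipped suffixes
lemma pvLoopA (n : Nat) : ∀ (P R : List String), P.length = R.length → ∀ (k : Nat), k + n = P.length →
    ∀ (acc : Int × Int × Int),
    (PySem.List.pyRange (k : Int) (P.length : Int) 1).foldl
      (fun (acc : Int × Int × Int) i =>
        if PySem.List.pyGetD R i "" == "*" then (acc.1, acc.2.1, acc.2.2 + 1)
        else if PySem.List.pyGetD P i "" == PySem.List.pyGetD R i "" then
          (acc.1 + 1, acc.2.1, acc.2.2)
        else (acc.1, acc.2.1 + 1, acc.2.2)) acc
    = ((P.drop k).zip (R.drop k)).foldl pvStep acc := by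
  induction n with
  | zero =>
    intro P R hlen k hk acc
    have : (k : Int) ≥ (P.length : Int) := by omega
    rw [PySem.List.pyRange_one_eq_nil this]
    have h1 : P.drop k = [] := List.drop_eq_nil_of_le (by omega)
    simp [h1]
  | succ n ih =>
    intro P R hlen k hk acc
    have hk' : k < P.length := by omega
    have hkr : k < R.length := by omega
    rw [PySem.List.pyRange_one_cons (by exact_mod_cast hk')]
    have hP : PySem.List.pyGetD P (k : Int) "" = P[k] := by
      rw [PySem.List.pyGetD_eq_getElem P "" (by omega) (by exact_mod_cast hk')]; simp
    have hR : PySem.List.pyGetD R (k : Int) "" = R[k] := by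
      rw [PySem.List.pyGetD_eq_getElem R "" (by omega) (by exact_mod_cast hkr)]; simp
    have hdP : P.drop k = P[k] :: P.drop (k + 1) := List.drop_eq_getElem_cons hk'
    have hdR : R.drop k = R[k] :: R.drop (k + 1) := List.drop_eq_getElem_cons hkr
    have hcast : (k : Int) + 1 = ((k + 1 : Nat) : Int) := by push_cast; ring
    rw [List.foldl_cons, hdP, hdR, List.zip_cons_cons, List.foldl_cons]
    rw [hP, hR, hcast, ih P R hlen (k + 1) (by omega)]
    rfl

-- the fold of pvStep counts the three disjoint categories
lemma pvFoldStep (zs : List (String × String)) : ∀ (c e s : Int),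
    zs.foldl pvStep (c, e, s) =
      (c + (zs.countP (fun pr => !(pr.2 == "*") && pr.1 == pr.2) : Int),
       e + (zs.countP (fun pr => !(pr.2 == "*") && !(pr.1 == pr.2)) : Int),
       s + (zs.countP (fun pr => pr.2 == "*") : Int)) := by
  induction zs with
  | nil => intro c e s; simp
  | cons z zs ih =>
    intro c e s
    by_cases h1 : z.2 = "*"
    · simp [pvStep, h1, ih]; ring
    · by_cases h2 : z.1 = z.2
      · simp [pvStep, h1, h2, ih]; ring
      · simp [pvStep, h1, h2, ih]; ring

-- the three categories partition the zipped list
lemma pvPartition (zs : List (String × String)) :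
    zs.countP (fun pr => !(pr.2 == "*") && pr.1 == pr.2)
      + zs.countP (fun pr => !(pr.2 == "*") && !(pr.1 == pr.2))
      + zs.countP (fun pr => pr.2 == "*") = zs.length := by
  induction zs with
  | nil => simp
  | cons z zs ih =>
    by_cases h1 : z.2 = "*"
    · simp [h1]; omega
    · by_cases h2 : z.1 = z.2
      · simp [h1, h2]; omega
      · simp [h1, h2]; omega

-- counting '*' answers: the zip's snd projection is exactly respuestas when lengths match
lemma pvCountStar (P R : List String) (hlen : P.length = R.length) :
    (P.zip R).countP (fun pr => pr.2 == "*") = R.count "*" := by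
  have hmap : (P.zip R).map Prod.snd = R := List.map_snd_zip (by omega)
  rw [List.count_eq_countP]
  conv_rhs => rw [← hmap, List.countP_map]
  rfl

-- ===== VERDICT (by name: the statement is the Claim_ definition above) =====
theorem corregir_test_spec : Claim_equal_corregir_test := by
  intro P R _
  unfold Spec_corregir_test corregir_test corregir_test_alt
  by_cases hlen : P.length = R.length
  · have hA := pvLoopA P.length P R hlen 0 (by omega) ((0 : Int), (0 : Int), (0 : Int))
    simp only [Nat.cast_zero, List.drop_zero] at hA
    rw [pvFoldStep] at hA
    simp only [hlen, ne_eq, not_true_eq_false, if_false]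
    rw [hlen] at hA
    rw [hA]
    have hpart := pvPartition (P.zip R)
    have hstar := pvCountStar P R hlen
    have hlz : (P.zip R).length = R.length := by simp [hlen]
    simp only [Option.some.injEq, List.cons.injEq, and_true]
    refine ⟨by ring, ?_, by rw [hstar]; ring⟩
    rw [hstar] at hpart
    omega
  · simp [hlen]
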